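-- pv_equiv track=rewrite | github.com/aosp-mirror/platform_external_qemu | android/build/tools/deps/src/aemu/main.py | dependency_tree
-- ===== SOURCE A (Python) =====
-- from typing import Dict, List, Set
-- from typing import Dict, Set, List
--
-- def dependency_tree(
--     graph: Dict[str, List[str]], seen: Set[str], target: str, prefix: str = ""
-- ):
--   """Generate a dependency tree representation for a given target in a dependency graph.
--
--   Args:
--
--   - graph (Dict[str, List[str]]): A dictionary representing the dependency
--     graph.
--   - seen (Set[str]): A set to keep track of seen targets to avoid cyclic
--     dependencies.
--   - target (str): The current target for which to generate the tree.
--   - prefix (str, optional): The prefix string for indentation, used for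
--     recursive calls.
--
--   Yields:
--   - str: Lines representing the dependency tree for the given target.
--   """
--   # Prefix components:
--   space = "    "
--   branch = "│   "
--   # Pointers:
--   tee = "├── "
--   last = "└── "
--
--   seen.add(target)
--   contents = [x for x in graph.get(target, []) if x not in seen]
--
--   # Each content gets pointers that are '├──' with a final '└──':
--   pointers = [tee] * (len(contents) - 1) + [last]
--
--   # The last target will have a '└──'
--   for pointer, next_target in zip(pointers, contents):
--     # this will result in a line like f'    ├── {next_target}'
--     yield prefix + pointer + next_target
--
--     # Check if the next_target has dependencies:
--     if graph.get(next_target):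
--       # Two cases, we are the last entry or not.
--       # if we are not the last we need to draw the line to us.
--       extension = branch if pointer == tee else space
--       yield from dependency_tree(
--           graph, seen, next_target, prefix=prefix + extension
--       )
-- ===== SOURCE B (Python) =====
-- def dependency_tree(graph, seen, target, prefix=""):
--     """Iterative re-implementation: explicit stack of (prefix, remaining-children)
--     frames instead of recursion; same lines, same mutation of `seen`."""
--     space = "    "
--     branch = "│   "
--     tee = "├── "
--     last = "└── "
--
--     seen.add(target)
--     stack = [(prefix, [k for k in graph.get(target, []) if k not in seen])]
--     while stack:
--         pfx, kids = stack[-1]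
--         if not kids:
--             stack.pop()
--             continue
--         child, rest = kids[0], kids[1:]
--         stack[-1] = (pfx, rest)
--         is_last = not rest
--         yield pfx + (last if is_last else tee) + child
--         if graph.get(child):
--             seen.add(child)
--             stack.append((pfx + (space if is_last else branch),
--                           [k for k in graph[child] if k not in seen]))
-- ===== Notes on version B (the rewrite author's own statement) =====
-- stated objective: alternative
-- what changed: Replaced A's recursive generator by an iterative pre-order DFS over an explicit stack of (prefix, remaining-children) frames, deriving each pointer from whether the frame has children left instead of A's precomputed [tee]*(n-1)+[last] pointer list zipped with the children.
import Mathlib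
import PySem

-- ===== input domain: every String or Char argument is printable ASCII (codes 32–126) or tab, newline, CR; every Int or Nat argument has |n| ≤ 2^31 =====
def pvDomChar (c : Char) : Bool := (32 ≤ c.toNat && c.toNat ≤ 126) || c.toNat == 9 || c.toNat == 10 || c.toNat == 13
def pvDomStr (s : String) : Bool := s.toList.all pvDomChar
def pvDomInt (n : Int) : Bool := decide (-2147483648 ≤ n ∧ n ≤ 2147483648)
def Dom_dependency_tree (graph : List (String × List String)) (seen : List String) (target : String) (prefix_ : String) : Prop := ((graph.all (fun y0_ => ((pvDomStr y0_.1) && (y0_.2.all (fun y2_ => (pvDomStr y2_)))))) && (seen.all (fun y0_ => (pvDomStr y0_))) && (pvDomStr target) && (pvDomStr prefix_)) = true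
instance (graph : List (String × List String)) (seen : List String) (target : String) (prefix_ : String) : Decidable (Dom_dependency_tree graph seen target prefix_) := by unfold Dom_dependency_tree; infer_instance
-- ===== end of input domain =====

-- B replaces A's recursive generator by an iterative DFS over an explicit stack of
-- (prefix, remaining-children) frames (objective: alternative decomposition, same cost).
-- Both Pythons mutate the caller's `seen` set identically; the theorems below are about
-- the sequence of yielded/returned lines. Both ports carry a structural depth fuel
-- (graph.length + 2) used only to make the recursion well-founded in Lean; the real
-- recursion depth is bounded by the number of distinct graph keys, so on actual runs
-- the guard never fires, and both ports guard at exactly the same point.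

-- ===== PORT A =====
def pvSpaceA : String := "    "
def pvBranchA : String := "│   "
def pvTeeA : String := "├── "
def pvLastA : String := "└── "

-- 'if graph.get(next_target):' — truthy iff the key maps to a non-empty list
def pvDepA (graph : List (String × List String)) (c : String) : Bool :=
  match PySem.Dict.get? (PySem.Dict.mk graph) c with
  | some (_ :: _) => true
  | _ => false

mutual
-- the body of A: add target to seen, filter contents, build the pointers list, loop
def pvGoA (graph : List (String × List String)) (n : Nat) (seen : PySem.Set String)
    (target prefix_ : String) : List String × PySem.Set String :=
  let s0 := PySem.Set.add seen target
  let contents := (PySem.Dict.getD (PySem.Dict.mk graph) target []).filter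
      (fun x => !(PySem.Set.contains s0 x))
  let pointers := List.replicate (contents.length - 1) pvTeeA ++ [pvLastA]
  pvLoopA graph n (pointers.zip contents) prefix_ s0
  termination_by (n, 1, 0)

-- A's 'for pointer, next_target in zip(pointers, contents):' loop, threading seen
def pvLoopA (graph : List (String × List String)) (n : Nat)
    (pairs : List (String × String)) (prefix_ : String) (seen : PySem.Set String) :
    List String × PySem.Set String :=
  match pairs with
  | [] => ([], seen)
  | (ptr, c) :: rest =>
    let line := prefix_ ++ ptr ++ c
    if pvDepA graph c then
      let ext := if ptr == pvTeeA then pvBranchA else pvSpaceA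
      match n with
      | 0 =>  -- fuel guard only: never reached when n starts at graph.length + 2
        let r := pvLoopA graph 0 rest prefix_ seen
        (line :: r.1, r.2)
      | Nat.succ m =>
        let rc := pvGoA graph m seen c (prefix_ ++ ext)
        let r := pvLoopA graph (m + 1) rest prefix_ rc.2
        (line :: rc.1 ++ r.1, r.2)
    else
      let r := pvLoopA graph n rest prefix_ seen
      (line :: r.1, r.2)
  termination_by (n, 0, pairs.length)
end

def dependency_tree (graph : List (String × List String)) (seen : List String) (target : String) (prefix_ : String) : List String :=
  (pvGoA graph (graph.length + 2) seen target prefix_).1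

-- ===== PORT B =====
def pvSpaceB : String := "    "
def pvBranchB : String := "│   "
def pvTeeB : String := "├── "
def pvLastB : String := "└── "

def pvDepB (graph : List (String × List String)) (c : String) : Bool :=
  match PySem.Dict.get? (PySem.Dict.mk graph) c with
  | some (_ :: _) => true
  | _ => false

-- B's '[k for k in graph.get(t, []) if k not in seen]'
def pvKidsB (graph : List (String × List String)) (seen : PySem.Set String) (t : String) :
    List String :=
  (PySem.Dict.getD (PySem.Dict.mk graph) t []).filter (fun x => !(PySem.Set.contains seen x))

-- largest adjacency-list length in the graph (termination bookkeeping only)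
def pvMaxAdj : List (String × List String) → Nat
  | [] => 0
  | p :: rest => max p.2.length (pvMaxAdj rest)

theorem pvGetD_len_le (graph : List (String × List String)) (c : String) :
    (PySem.Dict.getD (PySem.Dict.mk graph) c []).length ≤ pvMaxAdj graph := by
  induction graph with
  | nil => simp [PySem.Dict.getD, PySem.Dict.get?, pvMaxAdj]
  | cons p rest ih =>
    obtain ⟨k, v⟩ := p
    by_cases h : (k == c) = true
    · simp [PySem.Dict.getD, PySem.Dict.get?_mk_cons, h, pvMaxAdj]
    · simp only [PySem.Dict.getD, PySem.Dict.get?_mk_cons, h, pvMaxAdj,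
        Bool.false_eq_true, if_false]
      exact le_trans ih (le_max_right _ _)

theorem pvKidsB_len_le (graph : List (String × List String)) (seen : PySem.Set String)
    (t : String) : (pvKidsB graph seen t).length ≤ pvMaxAdj graph :=
  le_trans (List.length_filter_le _ _) (pvGetD_len_le graph t)

-- termination measure for the stack machine
def pvMeasureB (M : Nat) : List (String × List String × Nat) → Nat
  | [] => 0
  | (_, kids, d) :: stk => kids.length * (M + 2) ^ d + 1 + pvMeasureB M stk

theorem pvPushLt (k M W r S : Nat) (hk : k ≤ M) (hW : 1 ≤ W) :
    k * W + 1 + (r * (W * (M + 2)) + 1 + S) < (r + 1) * (W * (M + 2)) + 1 + S := by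
  have h1 : k * W ≤ M * W := Nat.mul_le_mul_right _ hk
  nlinarith

-- the iterative DFS: peek the top frame, pop it when exhausted, otherwise emit its
-- first remaining child and (if that child has dependencies) push the child's frame
def pvGoB (graph : List (String × List String)) (stk : List (String × List String × Nat))
    (seen : PySem.Set String) (acc : List String) : List String × PySem.Set String :=
  match stk with
  | [] => (acc, seen)
  | (_, [], _) :: stk' => pvGoB graph stk' seen acc
  | (pfx, c :: rest, d) :: stk' =>
    let isLast := rest.isEmpty
    let line := pfx ++ (if isLast then pvLastB else pvTeeB) ++ c
    if pvDepB graph c then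
      match d with
      | 0 =>  -- fuel guard only: never reached when the root frame starts at graph.length + 2
        pvGoB graph ((pfx, rest, 0) :: stk') seen (acc ++ [line])
      | Nat.succ m =>
        let s1 := PySem.Set.add seen c
        pvGoB graph
          ((pfx ++ (if isLast then pvSpaceB else pvBranchB), pvKidsB graph s1 c, m)
            :: (pfx, rest, Nat.succ m) :: stk') s1 (acc ++ [line])
    else
      pvGoB graph ((pfx, rest, d) :: stk') seen (acc ++ [line])
  termination_by pvMeasureB (pvMaxAdj graph) stk
  decreasing_by
  · simp [pvMeasureB]
  · simp only [pvMeasureB, List.length_cons, Nat.add_mul, Nat.one_mul]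
    have hW : 1 ≤ (pvMaxAdj graph + 2) ^ (0 : Nat) := by simp
    omega
  · simp only [pvMeasureB, pow_succ]
    exact pvPushLt _ _ _ _ _ (pvKidsB_len_le graph _ c)
      (Nat.one_le_pow _ _ (by omega))
  · simp only [pvMeasureB, List.length_cons, Nat.add_mul, Nat.one_mul]
    have hW : 1 ≤ (pvMaxAdj graph + 2) ^ d := Nat.one_le_pow _ _ (by omega)
    omega

def dependency_tree_alt (graph : List (String × List String)) (seen : List String) (target : String) (prefix_ : String) : List String :=
  (pvGoB graph
    [(prefix_, pvKidsB graph (PySem.Set.add seen target) target, graph.length + 2)]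
    (PySem.Set.add seen target) []).1

-- ===== PRECONDITION & SPEC =====
def Spec_dependency_tree (graph : List (String × List String)) (seen : List String) (target : String) (prefix_ : String) (out : List String) : Prop := out = dependency_tree_alt graph seen target prefix_
instance (graph : List (String × List String)) (seen : List String) (target : String) (prefix_ : String) (out : List String) : Decidable (Spec_dependency_tree graph seen target prefix_ out) := by unfold Spec_dependency_tree; infer_instance

-- ===== CLAIM (what is proved, stated in full; the proofs are below) =====
def Claim_equal_dependency_tree : Prop := ∀ (graph : List (String × List String)) (seen : List String) (target : String) (prefix_ : String), Dom_dependency_tree graph seen target prefix_ → Spec_dependency_tree graph seen target prefix_ (dependency_tree graph seen target prefix_)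

-- ===== LEMMAS AND PROOFS =====

-- A's zipped (pointer, child) list, as a function of the children alone
def pvPairs (kids : List String) : List (String × String) :=
  (List.replicate (kids.length - 1) pvTeeA ++ [pvLastA]).zip kids

theorem pvPairs_nil : pvPairs [] = [] := rfl

theorem pvPairs_cons (c : String) (rest : List String) :
    pvPairs (c :: rest) =
      ((if rest.isEmpty then pvLastA else pvTeeA), c) :: pvPairs rest := by
  cases rest with
  | nil => rfl
  | cons r rs => simp [pvPairs, List.replicate_succ]

-- denotation of a stack of B-frames in terms of A's loop
def pvDenote (graph : List (String × List String)) :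
    List (String × List String × Nat) → PySem.Set String → List String →
    List String × PySem.Set String
  | [], s, acc => (acc, s)
  | (pfx, kids, d) :: stk, s, acc =>
    let r := pvLoopA graph d (pvPairs kids) pfx s
    pvDenote graph stk r.2 (acc ++ r.1)

theorem pvGoA_eq_loop (graph : List (String × List String)) (n : Nat)
    (seen : PySem.Set String) (t p : String) :
    pvGoA graph n seen t p =
      pvLoopA graph n (pvPairs (pvKidsB graph (PySem.Set.add seen t) t)) p
        (PySem.Set.add seen t) := by
  rw [pvGoA]; rfl

-- constant bridges between the two ports' string literals
theorem pvLastAB : pvLastB = pvLastA := rfl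
theorem pvTeeAB : pvTeeB = pvTeeA := rfl

theorem pvDep_eq (graph : List (String × List String)) (c : String) :
    pvDepB graph c = pvDepA graph c := rfl

theorem pvLoopA_nil (graph : List (String × List String)) (n : Nat) (pfx : String)
    (s : PySem.Set String) : pvLoopA graph n [] pfx s = ([], s) := by
  rw [pvLoopA.eq_def]

theorem pvLoopA_cons_dep_zero (graph : List (String × List String)) (ptr c : String)
    (rest : List (String × String)) (pfx : String) (s : PySem.Set String)
    (hdep : pvDepA graph c = true) :
    pvLoopA graph 0 ((ptr, c) :: rest) pfx s =
      ((pfx ++ ptr ++ c) :: (pvLoopA graph 0 rest pfx s).1,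
        (pvLoopA graph 0 rest pfx s).2) := by
  rw [pvLoopA.eq_def]; simp [hdep]

theorem pvLoopA_cons_dep_succ (graph : List (String × List String)) (m : Nat)
    (ptr c : String) (rest : List (String × String)) (pfx : String)
    (s : PySem.Set String) (hdep : pvDepA graph c = true) :
    pvLoopA graph (m + 1) ((ptr, c) :: rest) pfx s =
      ((pfx ++ ptr ++ c) ::
          (pvGoA graph m s c (pfx ++ if ptr == pvTeeA then pvBranchA else pvSpaceA)).1 ++
          (pvLoopA graph (m + 1) rest pfx
            (pvGoA graph m s c (pfx ++ if ptr == pvTeeA then pvBranchA else pvSpaceA)).2).1,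
        (pvLoopA graph (m + 1) rest pfx
          (pvGoA graph m s c (pfx ++ if ptr == pvTeeA then pvBranchA else pvSpaceA)).2).2) := by
  rw [pvLoopA.eq_def]; simp [hdep]

theorem pvLoopA_cons_nodep (graph : List (String × List String)) (n : Nat)
    (ptr c : String) (rest : List (String × String)) (pfx : String)
    (s : PySem.Set String) (hdep : pvDepA graph c = false) :
    pvLoopA graph n ((ptr, c) :: rest) pfx s =
      ((pfx ++ ptr ++ c) :: (pvLoopA graph n rest pfx s).1,
        (pvLoopA graph n rest pfx s).2) := by
  rw [pvLoopA.eq_def]; simp [hdep]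

-- A expands with '│   ' after a tee and '    ' after a last; B tests last-ness directly
theorem pvExt_eq (b : Bool) :
    ((if b then pvLastA else pvTeeA) == pvTeeA) = !b := by
  cases b <;> decide

-- the simulation: the stack machine computes the fold of A's loop over its frames
theorem pvGoB_eq_denote (graph : List (String × List String))
    (stk : List (String × List String × Nat)) (seen : PySem.Set String)
    (acc : List String) :
    pvGoB graph stk seen acc = pvDenote graph stk seen acc := by
  induction stk, seen, acc using pvGoB.induct graph
  case case1 seen acc =>
    rw [pvGoB.eq_def]
    rfl
  case case2 seen acc pfx d stk' ih =>
    rw [pvGoB.eq_def]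
    simp only []
    rw [ih]
    simp [pvDenote, pvPairs_nil, pvLoopA_nil]
  case case3 seen acc pfx c rest stk' isLast line hdep ih =>
    have hA : pvDepA graph c = true := (pvDep_eq graph c) ▸ hdep
    simp only [line, isLast, dite_eq_ite] at ih
    rw [pvGoB.eq_def]
    simp only [hdep, if_true]
    rw [ih]
    simp only [pvDenote, pvPairs_cons, pvLoopA_cons_dep_zero _ _ _ _ _ _ hA,
      pvLastAB, pvTeeAB, List.append_assoc, List.singleton_append]
  case case4 seen acc pfx c rest stk' isLast line hdep m s1 ih =>
    have hA : pvDepA graph c = true := (pvDep_eq graph c) ▸ hdep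
    simp only [line, isLast, s1, dite_eq_ite] at ih
    rw [pvGoB.eq_def]
    simp only [hdep, if_true]
    rw [ih]
    simp only [pvDenote, pvPairs_cons, pvLoopA_cons_dep_succ _ _ _ _ _ _ _ hA,
      pvGoA_eq_loop, pvExt_eq, pvLastAB, pvTeeAB, pvSpaceB, pvBranchB, pvSpaceA, pvBranchA,
      List.append_assoc, List.singleton_append]
    cases rest.isEmpty <;> simp
  case case5 seen acc pfx c rest d stk' isLast line hdep ih =>
    have hA : pvDepA graph c = false := by
      rw [← pvDep_eq graph c]; exact Bool.not_eq_true _ ▸ hdep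
    simp only [line, isLast, dite_eq_ite] at ih
    rw [pvGoB.eq_def]
    simp only [hdep, if_false, Bool.false_eq_true]
    rw [ih]
    simp only [pvDenote, pvPairs_cons, pvLoopA_cons_nodep _ _ _ _ _ _ _ hA,
      pvLastAB, pvTeeAB, List.append_assoc, List.singleton_append]

-- ===== VERDICT (by name: the statement is the Claim_ definition above) =====
theorem dependency_tree_spec : Claim_equal_dependency_tree := by
  intro graph seen target prefix_ _
  unfold Spec_dependency_tree dependency_tree dependency_tree_alt
  rw [pvGoB_eq_denote, pvGoA_eq_loop]
  simp [pvDenote]
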